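-- pv_equiv track=rewrite | github.com/dodoyeon/SW_Academy | binary_search/1654_ransun_18.py | greedy_2
-- ===== SOURCE A (Python) =====
-- def greedy_2(r_list, k, n):
--     r_list.sort()
--     max_l = r_list[-1]
--     check = n
--     while check > 0:
--         check = n
--         for i in range(k):
--             check -= (r_list[k-i-1]//max_l)
--             if check <= 0:
--                 return max_l
--         max_l -= 1
--     return max_l
-- ===== SOURCE B (Python) =====
-- def greedy_2(r_list, k, n):
--     # Binary search on the cut length over the monotone feasibility predicate
--     # (A = the original scans lengths downward one by one and also sorts r_list
--     # in place; this version does not mutate its argument).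
--     s = sorted(r_list)
--     hi = s[-1]
--     lo, ans = 1, 0
--     while lo <= hi:
--         mid = (lo + hi) // 2
--         if sum(x // mid for x in s[:k]) >= n:
--             ans = mid
--             lo = mid + 1
--         else:
--             hi = mid - 1
--     return ans
-- ===== Notes on version B (the rewrite author's own statement) =====
-- stated objective: faster
-- what changed: Replaces A's downward linear scan over candidate lengths (recomputing the piece count at every length) by a binary search on the length over the monotone feasibility predicate 'sum(x//L for the k smallest rods) >= n'; B also does not mutate r_list (A sorts it in place). Pre_ restricts to the natural domain of nonnegative rod lengths: with negative rods feasibility is not monotone and the two scan orders may settle on different lengths.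
-- outside the precondition, e.g. on greedy_2([-1, 5], 2, 1): A returns 5, B returns 2; on greedy_2([-11, 1, 8560, 4, 1, 0], 1, 0): A returns 8560, B returns 0
import Mathlib
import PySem

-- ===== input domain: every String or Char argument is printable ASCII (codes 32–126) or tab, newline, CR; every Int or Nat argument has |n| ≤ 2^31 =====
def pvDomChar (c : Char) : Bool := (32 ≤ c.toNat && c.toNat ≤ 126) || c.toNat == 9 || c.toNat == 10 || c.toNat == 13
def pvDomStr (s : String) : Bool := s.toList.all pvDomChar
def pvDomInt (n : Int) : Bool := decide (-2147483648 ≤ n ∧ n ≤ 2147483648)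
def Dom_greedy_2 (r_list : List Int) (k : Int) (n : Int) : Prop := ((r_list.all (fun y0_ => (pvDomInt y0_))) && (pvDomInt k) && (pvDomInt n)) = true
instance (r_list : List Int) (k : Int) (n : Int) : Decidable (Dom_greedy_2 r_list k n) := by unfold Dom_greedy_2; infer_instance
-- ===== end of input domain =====

-- B replaces A's downward linear scan over candidate cut lengths by a binary search on the length
-- over the monotone feasibility predicate; equivalence is about the RETURN value only: A sorts
-- r_list in place, B does not mutate its argument.

-- ===== PORT A =====
-- inner 'for i in range(k)' loop: check -= r_list[k-i-1]//max_l; early 'return max_l' when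
-- check <= 0.  Sum.inl v = early return v, Sum.inr c = loop finished with final check c.
def pvAFor (s : List Int) (k L : Int) : List Int → Int → Int ⊕ Int
  | [], check => Sum.inr check
  | i :: rest, check =>
    let check' := check - PySem.Int.floordiv ((PySem.List.pyGet? s (k - i - 1)).getD 0) L
    if check' ≤ 0 then Sum.inl L else pvAFor s k L rest check'

-- outer 'while check > 0' loop; fuel only makes the recursion total (never exhausted under Pre_).
def pvAWhile (s : List Int) (k n : Int) : Nat → Int → Int → Int
  | 0, L, _ => L
  | fuel+1, L, check =>
    if 0 < check then
      match pvAFor s k L (PySem.List.pyRange 0 k 1) n with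
      | Sum.inl v => v
      | Sum.inr c => pvAWhile s k n fuel (L - 1) c
    else L

def greedy_2 (r_list : List Int) (k : Int) (n : Int) : Int :=
  let s := PySem.List.sorted r_list (fun x => x) false
  let maxL := (PySem.List.pyGet? s (-1)).getD 0
  pvAWhile s k n (maxL.toNat + 2) maxL n

-- ===== PORT B =====
-- feasible(mid) = sum(x // mid for x in s[:k]) >= n
def pvFeasible (s : List Int) (k n L : Int) : Bool :=
  decide (n ≤ ((PySem.List.slice s none (some k)).map (fun x => PySem.Int.floordiv x L)).sum)

-- 'while lo <= hi' binary-search loop; fuel only makes the recursion total.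
def pvBSearch (s : List Int) (k n : Int) : Nat → Int → Int → Int → Int
  | 0, _, _, ans => ans
  | fuel+1, lo, hi, ans =>
    if lo ≤ hi then
      let mid := PySem.Int.floordiv (lo + hi) 2
      if pvFeasible s k n mid then pvBSearch s k n fuel (mid + 1) hi mid
      else pvBSearch s k n fuel lo (mid - 1) ans
    else ans

def greedy_2_alt (r_list : List Int) (k : Int) (n : Int) : Int :=
  let s := PySem.List.sorted r_list (fun x => x) false
  let hi := (PySem.List.pyGet? s (-1)).getD 0
  pvBSearch s k n (hi.toNat + 2) 1 hi 0

-- ===== PRECONDITION & SPEC =====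
-- Pre_ is the task's natural domain.  For n > 0: a nonempty list of nonnegative rod lengths and a
-- piece count reachable at cut length 1 from the k smallest rods, with 1 <= k <= len(r_list)
-- (outside this A raises — ZeroDivisionError when the n pieces are unobtainable, IndexError when
-- k > len(r_list) — or diverges when k <= 0).  For n <= 0 (A returns the maximum immediately): a
-- nonempty list with some nonnegative rod such that the negative rods sum to at least n, or such
-- that the slice r_list[:k] is empty (k = 0 or k <= -len).  Lists with negative rods outside
-- these bounds are excluded: negative "lengths" lie outside the problem's natural domain, and on
-- them no canonical value exists — A's downward scan and B's binary search may legitimately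
-- settle on different lengths because feasibility is no longer monotone — see the cites.
def Pre_greedy_2 (r_list : List Int) (k : Int) (n : Int) : Prop :=
  r_list ≠ [] ∧
  ((n ≤ 0 ∧ (∃ x ∈ r_list, 0 ≤ x) ∧
    (n ≤ (r_list.map (fun x => min x 0)).sum ∨ k = 0 ∨ k + (r_list.length : Int) ≤ 0)) ∨
   (0 < n ∧ (∀ x ∈ r_list, 0 ≤ x) ∧ 1 ≤ k ∧ k ≤ (r_list.length : Int) ∧
    n ≤ ((PySem.List.sorted r_list (fun x => x) false).take k.toNat).sum))
instance (r_list : List Int) (k : Int) (n : Int) : Decidable (Pre_greedy_2 r_list k n) := by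
  unfold Pre_greedy_2; infer_instance

def pvWitness_greedy_2 : List Int × Int × Int := ([5, 3, 7], 3, 4)

def Spec_greedy_2 (r_list : List Int) (k : Int) (n : Int) (out : Int) : Prop := out = greedy_2_alt r_list k n
instance (r_list : List Int) (k : Int) (n : Int) (out : Int) : Decidable (Spec_greedy_2 r_list k n out) := by unfold Spec_greedy_2; infer_instance

-- ===== CLAIM (what is proved, stated in full; the proofs are below) =====
def Claim_equal_greedy_2 : Prop := ∀ (r_list : List Int) (k : Int) (n : Int), Dom_greedy_2 r_list k n → Pre_greedy_2 r_list k n → Spec_greedy_2 r_list k n (greedy_2 r_list k n)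

-- ===== LEMMAS AND PROOFS =====

-- floor division is antitone in a positive divisor, for a nonnegative dividend
theorem pv_floordiv_antitone (x a b : Int) (hx : 0 ≤ x) (ha : 0 < a) (hab : a ≤ b) :
    PySem.Int.floordiv x b ≤ PySem.Int.floordiv x a := by
  have hb : 0 < b := lt_of_lt_of_le ha hab
  rw [PySem.Int.floordiv_eq_ediv_of_pos ha, PySem.Int.floordiv_eq_ediv_of_pos hb]
  have h1 : 0 ≤ x / b := Int.ediv_nonneg hx (le_of_lt hb)
  rw [Int.le_ediv_iff_mul_le ha]
  calc x / b * a ≤ x / b * b := by exact mul_le_mul_of_nonneg_left hab h1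
    _ ≤ x := Int.ediv_mul_le x (by omega)

theorem pv_floordiv_nonneg (x L : Int) (hx : 0 ≤ x) (hL : 0 < L) :
    0 ≤ PySem.Int.floordiv x L := by
  rw [PySem.Int.floordiv_eq_ediv_of_pos hL]
  exact Int.ediv_nonneg hx (le_of_lt hL)

theorem pv_floordiv_one (x : Int) : PySem.Int.floordiv x 1 = x := by
  rw [PySem.Int.floordiv_eq_ediv_of_pos (by omega)]; exact Int.ediv_one x

-- characterisation of the inner for-loop of A: with nonnegative per-step terms, it early-returns
-- L exactly when the whole subtracted total drives check below 0
theorem pv_afor_char (s : List Int) (k L : Int) :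
    ∀ (is : List Int) (c : Int),
      (∀ i ∈ is, 0 ≤ PySem.Int.floordiv ((PySem.List.pyGet? s (k - i - 1)).getD 0) L) →
      pvAFor s k L is c =
        if is ≠ [] ∧ c - (is.map (fun i => PySem.Int.floordiv ((PySem.List.pyGet? s (k - i - 1)).getD 0) L)).sum ≤ 0
        then Sum.inl L
        else Sum.inr (c - (is.map (fun i => PySem.Int.floordiv ((PySem.List.pyGet? s (k - i - 1)).getD 0) L)).sum) := by
  intro is
  induction is with
  | nil => intro c _; simp [pvAFor]
  | cons i rest ih =>
    intro c hnn
    have hti : 0 ≤ PySem.Int.floordiv ((PySem.List.pyGet? s (k - i - 1)).getD 0) L := hnn i (by simp)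
    have hrest : ∀ j ∈ rest, 0 ≤ PySem.Int.floordiv ((PySem.List.pyGet? s (k - j - 1)).getD 0) L :=
      fun j hj => hnn j (by simp [hj])
    have hsum : 0 ≤ (rest.map (fun j => PySem.Int.floordiv ((PySem.List.pyGet? s (k - j - 1)).getD 0) L)).sum := by
      apply List.sum_nonneg; intro x hx
      obtain ⟨j, hj, rfl⟩ := List.mem_map.mp hx; exact hrest j hj
    simp only [pvAFor]
    set ti := PySem.Int.floordiv ((PySem.List.pyGet? s (k - i - 1)).getD 0) L with hdef
    by_cases h1 : c - ti ≤ 0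
    · rw [if_pos h1, if_pos]
      refine ⟨by simp, ?_⟩
      simp only [List.map_cons, List.sum_cons, ← hdef]; omega
    · rw [if_neg h1, ih (c - ti) hrest]
      simp only [List.map_cons, List.sum_cons, ← hdef]
      by_cases h2 : rest ≠ [] ∧ c - ti - (rest.map (fun j => PySem.Int.floordiv ((PySem.List.pyGet? s (k - j - 1)).getD 0) L)).sum ≤ 0
      · rw [if_pos h2, if_pos ⟨by simp, by omega⟩]
      · rw [if_neg h2, if_neg ?_]
        · congr 1; ring
        · intro ⟨_, hle⟩
          rcases List.eq_nil_or_concat rest with rfl | ⟨l', b, rfl⟩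
          · simp at hle; omega
          · exact h2 ⟨by simp, by omega⟩

-- reversed-range sum: Σ_{i<n} f (n-1-i) = Σ_{i<n} f i
theorem pv_sum_range_reflect (f : Nat → Int) (n : Nat) :
    ((List.range n).map (fun i => f (n - 1 - i))).sum = ((List.range n).map f).sum := by
  have h : (List.range n).map (fun i => f (n - 1 - i)) = ((List.range n).map f).reverse := by
    apply List.ext_getElem
    · simp
    · intro p h1 h2
      simp only [List.length_map, List.length_range] at h1 h2
      simp [List.getElem_reverse, List.getElem_map, List.getElem_range]
  rw [h, List.sum_reverse]

-- Σ_{j<m} g s[j] = Σ over take m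
theorem pv_sum_range_take (g : Int → Int) : ∀ (m : Nat) (s : List Int), m ≤ s.length →
    ((List.range m).map (fun j => g (s.getD j 0))).sum = ((s.take m).map g).sum := by
  intro m
  induction m with
  | zero => intro s _; simp
  | succ m ih =>
    intro s hm
    have hlt : m < s.length := by omega
    rw [List.range_succ, List.take_add_one]
    simp only [List.map_append, List.sum_append, List.map_cons, List.map_nil]
    rw [ih s (by omega)]
    simp [List.getD_eq_getElem?_getD, List.getElem?_eq_getElem hlt]

-- the total subtracted by A's inner loop equals the take-k sum used by B
theorem pv_afor_sum (s : List Int) (k' : Nat) (L : Int) (hk : k' ≤ s.length) :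
    ((PySem.List.pyRange 0 (k' : Int) 1).map
        (fun i => PySem.Int.floordiv ((PySem.List.pyGet? s ((k' : Int) - i - 1)).getD 0) L)).sum
      = ((s.take k').map (fun x => PySem.Int.floordiv x L)).sum := by
  rw [PySem.List.pyRange_zero_natCast]
  rw [List.map_map]
  have hmap : ((List.range k').map ((fun i => PySem.Int.floordiv ((PySem.List.pyGet? s ((k' : Int) - i - 1)).getD 0) L) ∘ (fun (i : Nat) => (i : Int))))
      = (List.range k').map (fun i => PySem.Int.floordiv (s.getD (k' - 1 - i) 0) L) := by
    apply List.map_congr_left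
    intro i hi
    have hi' : i < k' := List.mem_range.mp hi
    have hidx : (k' : Int) - (i : Int) - 1 = ((k' - 1 - i : Nat) : Int) := by omega
    show PySem.Int.floordiv ((PySem.List.pyGet? s ((k' : Int) - (i : Int) - 1)).getD 0) L = _
    rw [hidx, PySem.List.pyGet?_natCast]
    have hlt : k' - 1 - i < s.length := by omega
    simp [List.getElem?_eq_getElem hlt, List.getD_eq_getElem?_getD]
  rw [hmap]
  rw [pv_sum_range_reflect (fun j => PySem.Int.floordiv (s.getD j 0) L) k']
  exact pv_sum_range_take (fun x => PySem.Int.floordiv x L) k' s hk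

-- existence of the greatest feasible length below 1 + m
theorem pv_exists_greatest (F : Int → Prop) [DecidablePred F] :
    ∀ (m : Nat), F 1 → ∃ a : Int, 1 ≤ a ∧ a ≤ 1 + (m : Int) ∧ F a ∧ (a = 1 + (m : Int) ∨ ¬ F (a + 1)) := by
  intro m
  induction m with
  | zero => intro h1; exact ⟨1, le_refl 1, by omega, h1, Or.inl (by omega)⟩
  | succ m ih =>
    intro h1
    by_cases htop : F (1 + (m : Int) + 1)
    · exact ⟨1 + (m : Int) + 1, by omega, by push_cast; omega, htop, Or.inl (by push_cast; omega)⟩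
    · obtain ⟨a, ha1, ham, hFa, hor⟩ := ih h1
      refine ⟨a, ha1, by push_cast; omega, hFa, Or.inr ?_⟩
      rcases hor with heq | hnot
      · rw [heq]; exact htop
      · exact hnot

-- A's outer while loop returns a, given the inner-loop behaviour at a and above a
theorem pv_awhile_eq (s : List Int) (k n a M : Int)
    (hsucc : ∀ c : Int, 0 < c → pvAFor s k a (PySem.List.pyRange 0 k 1) n = Sum.inl a)
    (hfail : ∀ L : Int, a < L → L ≤ M →
        ∃ c : Int, pvAFor s k L (PySem.List.pyRange 0 k 1) n = Sum.inr c ∧ 0 < c) :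
    ∀ (fuel : Nat) (L c : Int), a ≤ L → L ≤ M → (L - a).toNat < fuel → (a < L → 0 < c) →
      pvAWhile s k n fuel L c = a := by
  intro fuel
  induction fuel with
  | zero => intro L c _ _ hfu _; omega
  | succ fuel ih =>
    intro L c haL hLM hfu hc
    simp only [pvAWhile]
    by_cases hcpos : 0 < c
    · rw [if_pos hcpos]
      by_cases heq : L = a
      · subst heq; rw [hsucc c hcpos]
      · have hlt : a < L := lt_of_le_of_ne haL (Ne.symm heq)
        obtain ⟨c', hres, hc'⟩ := hfail L hlt hLM
        rw [hres]
        exact ih (L - 1) c' (by omega) (by omega) (by omega) (fun _ => hc')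
    · rw [if_neg hcpos]
      by_cases heq : L = a
      · exact heq
      · exact absurd (hc (lt_of_le_of_ne haL (Ne.symm heq))) hcpos

-- B's binary search returns a, given the feasibility characterisation on [1, M]
theorem pv_bsearch_eq (s : List Int) (k n a M : Int)
    (hchar : ∀ L : Int, 1 ≤ L → L ≤ M → (pvFeasible s k n L = true ↔ L ≤ a)) :
    ∀ (fuel : Nat) (lo hi ans : Int), 1 ≤ lo → hi ≤ M → ans = lo - 1 → lo - 1 ≤ a → a ≤ hi →
      (hi - lo + 1).toNat < fuel → pvBSearch s k n fuel lo hi ans = a := by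
  intro fuel
  induction fuel with
  | zero => intro lo hi ans _ _ _ _ _ hfu; omega
  | succ fuel ih =>
    intro lo hi ans hlo hhi hans hloa hahi hfu
    simp only [pvBSearch]
    by_cases hle : lo ≤ hi
    · rw [if_pos hle]
      obtain ⟨hmid1, hmid2⟩ := PySem.Int.floordiv_two_mid_bounds hle
      set mid := PySem.Int.floordiv (lo + hi) 2 with hmiddef
      by_cases hf : pvFeasible s k n mid = true
      · rw [if_pos hf]
        have hma : mid ≤ a := (hchar mid (by omega) (by omega)).mp hf
        exact ih (mid + 1) hi mid (by omega) hhi (by omega) (by omega) hahi (by omega)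
      · rw [if_neg hf]
        have hma : ¬ (mid ≤ a) := fun hle' => hf ((hchar mid (by omega) (by omega)).mpr hle')
        exact ih lo (mid - 1) ans hlo (by omega) hans hloa (by omega) (by omega)
    · rw [if_neg hle]; omega

-- s[:k] is always a take
theorem pv_slice_is_take (s : List Int) (k : Int) :
    ∃ t : Nat, PySem.List.slice s none (some k) = s.take t := by
  by_cases hk : 0 ≤ k
  · exact ⟨k.toNat, PySem.List.slice_to s hk⟩
  · obtain ⟨m, hm, hk'⟩ : ∃ m : Nat, 0 < m ∧ k = -(m : Int) := ⟨(-k).toNat, by omega, by omega⟩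
    subst hk'
    exact ⟨s.length - m, PySem.List.slice_to_neg_natCast s m hm⟩

-- in a ≤-pairwise list every element is at most the last one
theorem pv_le_getLast : ∀ (l : List Int) (h : l ≠ []) (_ : l.Pairwise (· ≤ ·))
    (x : Int), x ∈ l → x ≤ l.getLast h := by
  intro l
  induction l with
  | nil => intro h; exact absurd rfl h
  | cons a t ih =>
    intro _ hp x hx
    rcases List.pairwise_cons.mp hp with ⟨ha, hpt⟩
    cases t with
    | nil => simp at hx; simp [hx, List.getLast]
    | cons b t' =>
      have htne : (b :: t') ≠ [] := by simp
      rw [List.getLast_cons htne]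
      rcases List.mem_cons.mp hx with rfl | hxt
      · exact ha _ (List.getLast_mem htne)
      · exact ih htne hpt x hxt

-- min x 0 is a lower bound for x // L when L > 0
theorem pv_min_le_floordiv (x L : Int) (hL : 0 < L) : min x 0 ≤ PySem.Int.floordiv x L := by
  by_cases hx : 0 ≤ x
  · calc min x 0 ≤ 0 := min_le_right x 0
      _ ≤ PySem.Int.floordiv x L := pv_floordiv_nonneg x L hx hL
  · have hmin : min x 0 = x := min_eq_left (by omega)
    rw [hmin, PySem.Int.floordiv_eq_ediv_of_pos hL, Int.le_ediv_iff_mul_le hL]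
    nlinarith

theorem pv_sum_nonpos (l : List Int) (h : ∀ x ∈ l, x ≤ 0) : l.sum ≤ 0 := by
  induction l with
  | nil => simp
  | cons a t ih =>
    rw [List.sum_cons]
    have := h a (by simp)
    have := ih (fun x hx => h x (by simp [hx]))
    omega

-- the slice sum of floor-divisions is at least the total negative mass of the list
theorem pv_negmass_le_slice_sum (s : List Int) (t : Nat) (L : Int) (hL : 0 < L) :
    (s.map (fun x => min x 0)).sum ≤ ((s.take t).map (fun x => PySem.Int.floordiv x L)).sum := by
  have hsplit : (s.map (fun x => min x 0)).sum
      = ((s.take t).map (fun x => min x 0)).sum + ((s.drop t).map (fun x => min x 0)).sum := by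
    conv_lhs => rw [← List.take_append_drop t s]
    rw [List.map_append, List.sum_append]
  have hdrop : ((s.drop t).map (fun x => min x 0)).sum ≤ 0 := by
    apply pv_sum_nonpos
    intro x hx
    obtain ⟨y, _, rfl⟩ := List.mem_map.mp hx
    exact min_le_right y 0
  have htake : ((s.take t).map (fun x => min x 0)).sum
      ≤ ((s.take t).map (fun x => PySem.Int.floordiv x L)).sum := by
    apply List.sum_le_sum
    intro x _
    exact pv_min_le_floordiv x L hL
  omega

-- ===== VERDICT (by name: the statement is the Claim_ definition above) =====
theorem greedy_2_spec : Claim_equal_greedy_2 := by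
  unfold Claim_equal_greedy_2
  intro r_list k n _ hpre
  obtain ⟨hne, hcase⟩ := hpre
  unfold Spec_greedy_2 greedy_2 greedy_2_alt
  set s := PySem.List.sorted r_list (fun x => x) false with hs
  have hsne : s ≠ [] := by
    intro h; exact hne ((PySem.List.sorted_eq_nil_iff r_list _ _).mp h)
  have hlen : s.length = r_list.length := PySem.List.length_sorted r_list _ _
  have hpair : s.Pairwise (· ≤ ·) := PySem.List.sorted_pairwise r_list _
  set M := (PySem.List.pyGet? s (-1)).getD 0 with hM
  have hMval : M = s.getLast hsne := by
    rw [hM, PySem.List.pyGet?_neg_one, List.getLast?_eq_getLast_of_ne_nil hsne]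
    rfl
  have hmax : ∀ x ∈ s, x ≤ M := by
    intro x hx; rw [hMval]; exact pv_le_getLast s hsne hpair x hx
  have hperm : s.Perm r_list := PySem.List.sorted_perm r_list _ _
  rcases hcase with ⟨hn0, ⟨x0, hx0mem, hx00⟩, hcond⟩ | ⟨hn1, hpos, hk1, hklen, hsum⟩
  · -- n ≤ 0 : A exits immediately with M; every length in [1, M] is feasible for B, hence M
    have hM0 : 0 ≤ M := le_trans hx00 (hmax x0 ((PySem.List.mem_sorted r_list _ _ x0).mpr hx0mem))
    have hA : pvAWhile s k n (M.toNat + 2) M n = M := by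
      show pvAWhile s k n (M.toNat + 1 + 1) M n = M
      simp only [pvAWhile]
      rw [if_neg (by omega)]
    rw [hA]
    have hfeas : ∀ L : Int, 0 < L →
        n ≤ ((PySem.List.slice s none (some k)).map (fun x => PySem.Int.floordiv x L)).sum := by
      intro L hL
      rcases hcond with hneg | hk0 | hklow
      · have hnegs : n ≤ (s.map (fun x => min x 0)).sum := by
          rw [List.Perm.sum_eq (List.Perm.map _ hperm)]
          exact hneg
        obtain ⟨t, ht⟩ := pv_slice_is_take s k
        rw [ht]
        exact le_trans hnegs (pv_negmass_le_slice_sum s t L hL)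
      · subst hk0
        rw [PySem.List.slice_to s (by omega)]
        simp [hn0]
      · have hlen1 : 0 < r_list.length := List.length_pos_of_ne_nil hne
        have hk0' : k < 0 := by omega
        obtain ⟨m, hm, hk'⟩ : ∃ m : Nat, 0 < m ∧ k = -(m : Int) := ⟨(-k).toNat, by omega, by omega⟩
        rw [hk', PySem.List.slice_to_neg_natCast s m hm]
        have hm' : s.length - m = 0 := by omega
        rw [hm']
        simp [hn0]
    rcases eq_or_lt_of_le hM0 with hM00 | hM1
    · -- M = 0 : the search interval [1, 0] is empty, B answers 0 = M
      have hB : pvBSearch s k n (M.toNat + 2) 1 M 0 = 0 := by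
        show pvBSearch s k n (M.toNat + 1 + 1) 1 M 0 = 0
        simp only [pvBSearch]
        rw [if_neg (by omega)]
      rw [hB]; omega
    · have hchar : ∀ L : Int, 1 ≤ L → L ≤ M → (pvFeasible s k n L = true ↔ L ≤ M) := by
        intro L hL1 hLM
        constructor
        · intro _; exact hLM
        · intro _
          unfold pvFeasible
          exact decide_eq_true (hfeas L (by omega))
      exact (pv_bsearch_eq s k n M M hchar (M.toNat + 2) 1 M 0
        (by omega) (le_refl M) (by omega) (by omega) (le_refl M) (by omega)).symm
  · -- main case: 0 < n, rods ≥ 0, 1 ≤ k ≤ len, n ≤ sum of the k smallest rods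
    have hspos : ∀ x ∈ s, 0 ≤ x := by
      intro x hx; exact hpos x ((PySem.List.mem_sorted r_list _ _ x).mp hx)
    have hk' : (k.toNat : Int) = k := by omega
    have hklen' : k.toNat ≤ s.length := by omega
    have hM1 : 1 ≤ M := by
      by_contra hMle
      have hall0 : ∀ x ∈ s.take k.toNat, x ≤ 0 := by
        intro x hx
        have := hmax x (List.mem_of_mem_take hx)
        omega
      have := pv_sum_nonpos (s.take k.toNat) hall0
      omega
    set ST : Int → Int := fun L => ((s.take k.toNat).map (fun x => PySem.Int.floordiv x L)).sum with hST
    have hST1 : n ≤ ST 1 := by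
      have h1 : (s.take k.toNat).map (fun x => PySem.Int.floordiv x 1) = s.take k.toNat := by
        have h2 : (fun x => PySem.Int.floordiv x 1) = (fun x : Int => x) := by
          funext x; exact pv_floordiv_one x
        rw [h2, List.map_id']
      show n ≤ ((s.take k.toNat).map (fun x => PySem.Int.floordiv x 1)).sum
      rw [h1]; exact hsum
    have hanti : ∀ L1 L2 : Int, 1 ≤ L1 → L1 ≤ L2 → ST L2 ≤ ST L1 := by
      intro L1 L2 h1 h12
      apply List.sum_le_sum
      intro x hx
      exact pv_floordiv_antitone x L1 L2
        (hspos x (List.mem_of_mem_take hx)) (by omega) h12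
    obtain ⟨a, ha1, haM, hFa, hor⟩ :=
      pv_exists_greatest (fun L => n ≤ ST L) (M - 1).toNat hST1
    have haM' : a ≤ M := by omega
    have hchar : ∀ L : Int, 1 ≤ L → L ≤ M → (n ≤ ST L ↔ L ≤ a) := by
      intro L hL1 hLM
      constructor
      · intro hF
        by_contra hgt
        rcases hor with heq | hnot
        · omega
        · exact hnot (le_trans hF (hanti (a + 1) L (by omega) (by omega)))
      · intro hLa
        exact le_trans hFa (hanti L a hL1 hLa)
    have hterms : ∀ L : Int, 1 ≤ L → ∀ i ∈ PySem.List.pyRange 0 k 1,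
        0 ≤ PySem.Int.floordiv ((PySem.List.pyGet? s (k - i - 1)).getD 0) L := by
      intro L hL i hi
      obtain ⟨hi0, hik⟩ := (PySem.List.mem_pyRange_one).mp hi
      have h0 : 0 ≤ k - i - 1 := by omega
      have h1 : k - i - 1 < (s.length : Int) := by omega
      rw [PySem.List.pyGet?_eq_some_getElem s h0 h1]
      show 0 ≤ PySem.Int.floordiv (s[(k - i - 1).toNat]'(by omega)) L
      exact pv_floordiv_nonneg _ L
        (hspos _ (List.getElem_mem (by omega : (k - i - 1).toNat < s.length)))
        (by omega)
    have hsumA : ∀ L : Int,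
        ((PySem.List.pyRange 0 k 1).map
          (fun i => PySem.Int.floordiv ((PySem.List.pyGet? s (k - i - 1)).getD 0) L)).sum = ST L := by
      intro L
      have h := pv_afor_sum s k.toNat L hklen'
      rw [hk'] at h
      exact h
    have hrne : PySem.List.pyRange 0 k 1 ≠ [] := by
      rw [PySem.List.pyRange_one_cons (by omega : (0:Int) < k)]
      simp
    have hA : pvAWhile s k n (M.toNat + 2) M n = a := by
      apply pv_awhile_eq s k n a M
      · intro c _
        rw [pv_afor_char s k a (PySem.List.pyRange 0 k 1) n (hterms a (by omega))]
        rw [if_pos ⟨hrne, by rw [hsumA a]; omega⟩]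
      · intro L haL hLM
        have hnF : ¬ (n ≤ ST L) := fun hF => by
          have := (hchar L (by omega) hLM).mp hF; omega
        refine ⟨n - ST L, ?_, by omega⟩
        rw [pv_afor_char s k L (PySem.List.pyRange 0 k 1) n (hterms L (by omega))]
        rw [if_neg (by rw [hsumA L]; rintro ⟨-, hle⟩; omega), hsumA L]
      · exact haM'
      · exact le_refl M
      · omega
      · intro _; omega
    have hB : pvBSearch s k n (M.toNat + 2) 1 M 0 = a := by
      apply pv_bsearch_eq s k n a M
      · intro L hL1 hLM
        unfold pvFeasible
        rw [show (PySem.List.slice s none (some k)) = s.take k.toNat from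
          PySem.List.slice_to s (by omega)]
        rw [decide_eq_true_iff]
        exact hchar L hL1 hLM
      · omega
      · exact le_refl M
      · omega
      · omega
      · exact haM'
      · omega
    rw [hA, hB]
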